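-- pv_equiv track=rewrite | github.com/robertoBosio/NN2FPGA | nn2fpga/py/backend/ilp_utils.py | find_range
-- ===== SOURCE A (Python) =====
-- def find_range(divisors, ilp_value):
--     low_bound = divisors[0]
--     low_index = 0
--     high_bound = divisors[-1]
--     high_index = len(divisors) - 1
--     for i, divisor in enumerate(divisors):
--         if (divisor >= ilp_value and abs(divisor - ilp_value) < abs(high_bound - ilp_value)):
--             high_bound = divisor
--             high_index = i
--         if (divisor <= ilp_value and abs(divisor - ilp_value) < abs(low_bound - ilp_value)):
--             low_bound = divisor
--             low_index = i
--
--     return low_bound, low_index, high_bound, high_index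
-- ===== SOURCE B (Python) =====
-- def find_range(divisors, ilp_value):
--     n = len(divisors)
--     low_thr = abs(divisors[0] - ilp_value)
--     high_thr = abs(divisors[-1] - ilp_value)
--     low_cands = [(ilp_value - d, i) for i, d in enumerate(divisors)
--                  if d <= ilp_value and ilp_value - d < low_thr]
--     high_cands = [(d - ilp_value, i) for i, d in enumerate(divisors)
--                   if d >= ilp_value and d - ilp_value < high_thr]
--     if low_cands:
--         dist, idx = min(low_cands)
--         low_bound, low_index = ilp_value - dist, idx
--     else:
--         low_bound, low_index = divisors[0], 0
--     if high_cands: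
--         dist, idx = min(high_cands)
--         high_bound, high_index = ilp_value + dist, idx
--     else:
--         high_bound, high_index = divisors[-1], n - 1
--     return low_bound, low_index, high_bound, high_index
-- ===== Notes on version B (the rewrite author's own statement) =====
-- stated objective: alternative
-- what changed: Replaces A's single stateful strict-improvement loop over four running variables by a declarative two-pass form: build the candidate lists (distance, index) of divisors on each side of the target that beat the sentinel endpoints, then take the lexicographic min of each (or fall back to the endpoint).
import Mathlib
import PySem

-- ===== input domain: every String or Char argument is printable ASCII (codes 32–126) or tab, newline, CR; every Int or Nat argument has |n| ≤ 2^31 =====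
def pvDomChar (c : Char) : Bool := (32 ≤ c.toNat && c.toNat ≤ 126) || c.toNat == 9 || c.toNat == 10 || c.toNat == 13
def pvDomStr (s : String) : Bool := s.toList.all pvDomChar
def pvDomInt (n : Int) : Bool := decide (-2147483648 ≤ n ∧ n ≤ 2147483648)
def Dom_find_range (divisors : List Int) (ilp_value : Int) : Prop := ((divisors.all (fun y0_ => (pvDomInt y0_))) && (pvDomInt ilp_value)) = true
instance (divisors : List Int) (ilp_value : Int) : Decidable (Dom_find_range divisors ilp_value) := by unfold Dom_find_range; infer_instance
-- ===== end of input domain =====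

-- B replaces A's stateful strict-improvement loop by filter-candidates-then-lexicographic-min per side (alternative decomposition, same O(n) cost).


-- ===== PORT A =====
-- the two independent if-updates of A's loop body, named for the fold
def pvStepLow (v : Int) (s p : Int × Int) : Int × Int :=
  if p.2 ≤ v ∧ |p.2 - v| < |s.1 - v| then (p.2, p.1) else s

def pvStepHigh (v : Int) (s p : Int × Int) : Int × Int :=
  if p.2 ≥ v ∧ |p.2 - v| < |s.1 - v| then (p.2, p.1) else s

-- divisors[0] / divisors[-1]: Python raises IndexError on []; Pre_ excludes that, so the default 0 is never observed
def find_range (divisors : List Int) (ilp_value : Int) : Int × Int × Int × Int :=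
  let low0 : Int × Int := (PySem.List.pyGetD divisors 0 0, 0)
  let high0 : Int × Int := (PySem.List.pyGetD divisors (-1) 0, (divisors.length : Int) - 1)
  let st := (PySem.List.enumerate divisors 0).foldl
      (fun s p => (pvStepLow ilp_value s.1 p, pvStepHigh ilp_value s.2 p)) (low0, high0)
  (st.1.1, st.1.2, st.2.1, st.2.2)

-- ===== PORT B =====
def find_range_alt (divisors : List Int) (ilp_value : Int) : Int × Int × Int × Int :=
  let n : Int := divisors.length
  let lowThr := |PySem.List.pyGetD divisors 0 0 - ilp_value|
  let highThr := |PySem.List.pyGetD divisors (-1) 0 - ilp_value|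
  let lowCands := (PySem.List.enumerate divisors 0).filterMap
      (fun p => if p.2 ≤ ilp_value ∧ ilp_value - p.2 < lowThr then some (ilp_value - p.2, p.1) else none)
  let highCands := (PySem.List.enumerate divisors 0).filterMap
      (fun p => if p.2 ≥ ilp_value ∧ p.2 - ilp_value < highThr then some (p.2 - ilp_value, p.1) else none)
  let low : Int × Int := match PySem.List.min2? lowCands (fun x => x.1) (fun x => x.2) with
    | some di => (ilp_value - di.1, di.2)
    | none => (PySem.List.pyGetD divisors 0 0, 0)
  let high : Int × Int := match PySem.List.min2? highCands (fun x => x.1) (fun x => x.2) with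
    | some di => (ilp_value + di.1, di.2)
    | none => (PySem.List.pyGetD divisors (-1) 0, n - 1)
  (low.1, low.2, high.1, high.2)

-- ===== PRECONDITION & SPEC =====
-- Python A evaluates divisors[0] and divisors[-1]: it raises IndexError exactly on the empty list.
def Pre_find_range (divisors : List Int) (ilp_value : Int) : Prop := divisors ≠ []
instance (divisors : List Int) (ilp_value : Int) : Decidable (Pre_find_range divisors ilp_value) := by unfold Pre_find_range; infer_instance
def pvWitness_find_range : List Int × Int := ([2, 4, 8], 5)

def Spec_find_range (divisors : List Int) (ilp_value : Int) (out : Int × Int × Int × Int) : Prop := out = find_range_alt divisors ilp_value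
instance (divisors : List Int) (ilp_value : Int) (out : Int × Int × Int × Int) : Decidable (Spec_find_range divisors ilp_value out) := by unfold Spec_find_range; infer_instance

-- ===== CLAIM (what is proved, stated in full; the proofs are below) =====
def Claim_equal_find_range : Prop := ∀ (divisors : List Int) (ilp_value : Int), Dom_find_range divisors ilp_value → Pre_find_range divisors ilp_value → Spec_find_range divisors ilp_value (find_range divisors ilp_value)

-- ===== LEMMAS AND PROOFS =====

-- lexicographic ≤ on (distance, index) pairs, as Python's tuple comparison orders them
def pvLexLe (a x : Int × Int) : Prop := a.1 < x.1 ∨ (a.1 = x.1 ∧ a.2 ≤ x.2)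

-- the accumulator step of PySem.List.min2? specialized to fst/snd keys (definitional copy)
def pvM2Step (acc : Option (Int × Int)) (x : Int × Int) : Option (Int × Int) :=
  match acc with
  | none => some x
  | some m => if (decide (x.1 < m.1) || !decide (m.1 < x.1) && decide (x.2 < m.2)) = true then some x else some m

lemma pvMin2Eq (L : List (Int × Int)) :
    PySem.List.min2? L (fun x => x.1) (fun x => x.2) = L.foldl pvM2Step none := by
  unfold PySem.List.min2?
  congr 1
  funext acc x
  cases acc <;> rfl

lemma pvFoldStep (xs : List (Int × Int)) : ∀ (a : Int × Int),
    ∃ r, xs.foldl pvM2Step (some a) = some r ∧ (r = a ∨ r ∈ xs) ∧ pvLexLe r a ∧ ∀ x ∈ xs, pvLexLe r x := by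
  induction xs with
  | nil =>
    intro a
    exact ⟨a, rfl, Or.inl rfl, Or.inr ⟨rfl, le_refl _⟩, by simp⟩
  | cons x t ih =>
    intro a
    by_cases hc : (decide (x.1 < a.1) || !decide (a.1 < x.1) && decide (x.2 < a.2)) = true
    · have hstep : pvM2Step (some a) x = some x := by simp only [pvM2Step, if_pos hc]
      have hcp : x.1 < a.1 ∨ (¬ a.1 < x.1 ∧ x.2 < a.2) := by simpa using hc
      obtain ⟨r, hr, hmem, hra, hall⟩ := ih x
      refine ⟨r, by simpa [hstep] using hr, ?_, ?_, ?_⟩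
      · rcases hmem with h | h
        · exact Or.inr (h ▸ List.mem_cons_self)
        · exact Or.inr (List.mem_cons_of_mem _ h)
      · unfold pvLexLe at hra ⊢; omega
      · intro y hy
        rcases List.mem_cons.mp hy with rfl | hy
        · exact hra
        · exact hall y hy
    · have hstep : pvM2Step (some a) x = some a := by simp only [pvM2Step, if_neg hc]
      have hcp : ¬ (x.1 < a.1 ∨ (¬ a.1 < x.1 ∧ x.2 < a.2)) := by simpa using hc
      obtain ⟨r, hr, hmem, hra, hall⟩ := ih a
      refine ⟨r, by simpa [hstep] using hr, ?_, hra, ?_⟩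
      · rcases hmem with h | h
        · exact Or.inl h
        · exact Or.inr (List.mem_cons_of_mem _ h)
      · intro y hy
        rcases List.mem_cons.mp hy with rfl | hy
        · unfold pvLexLe at hra ⊢; omega
        · exact hall y hy

lemma pvMin2Spec (L : List (Int × Int)) (h : L ≠ []) :
    ∃ m, L.foldl pvM2Step none = some m ∧ m ∈ L ∧ ∀ x ∈ L, pvLexLe m x := by
  cases L with
  | nil => exact absurd rfl h
  | cons x t =>
    obtain ⟨r, hr, hmem, hra, hall⟩ := pvFoldStep t x
    refine ⟨r, by simpa [pvM2Step] using hr, ?_, ?_⟩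
    · rcases hmem with h | h
      · exact h ▸ List.mem_cons_self
      · exact List.mem_cons_of_mem _ h
    · intro y hy
      rcases List.mem_cons.mp hy with rfl | hy
      · exact hra
      · exact hall y hy

lemma pvMin2Least (L : List (Int × Int)) (m : Int × Int) (hm : m ∈ L)
    (hle : ∀ x ∈ L, pvLexLe m x) : L.foldl pvM2Step none = some m := by
  obtain ⟨r, hr, hrmem, hrle⟩ := pvMin2Spec L (List.ne_nil_of_mem hm)
  have h1 : pvLexLe m r := hle r hrmem
  have h2 : pvLexLe r m := hrle m hm
  have : r = m := by
    unfold pvLexLe at h1 h2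
    have e1 : r.1 = m.1 := by omega
    have e2 : r.2 = m.2 := by omega
    exact Prod.ext e1 e2
  rw [hr, this]

lemma pvMemCandsHigh (v thr : Int) (t : List (Int × Int)) (x : Int × Int) :
    x ∈ t.filterMap (fun p => if p.2 ≥ v ∧ p.2 - v < thr then some (p.2 - v, p.1) else none)
      ↔ ∃ q ∈ t, (q.2 ≥ v ∧ q.2 - v < thr) ∧ x = (q.2 - v, q.1) := by
  simp only [List.mem_filterMap]
  constructor
  · rintro ⟨q, hq, hfq⟩
    by_cases hc : q.2 ≥ v ∧ q.2 - v < thr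
    · rw [if_pos hc] at hfq
      exact ⟨q, hq, hc, (Option.some_inj.mp hfq).symm⟩
    · rw [if_neg hc] at hfq; cases hfq
  · rintro ⟨q, hq, hc, rfl⟩
    exact ⟨q, hq, by rw [if_pos hc]⟩

lemma pvHighLoop (v : Int) (l : List (Int × Int)) : ∀ (b i : Int),
    l.Pairwise (fun p q => p.1 < q.1) →
    l.foldl (pvStepHigh v) (b, i)
      = match (l.filterMap (fun p => if p.2 ≥ v ∧ p.2 - v < |b - v| then some (p.2 - v, p.1) else none)).foldl pvM2Step none with
        | some di => (v + di.1, di.2)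
        | none => (b, i) := by
  induction l with
  | nil => intro b i _; rfl
  | cons p t ih =>
    intro b i hpw
    have hpt : ∀ q ∈ t, p.1 < q.1 := (List.pairwise_cons.mp hpw).1
    have ht : t.Pairwise (fun p q => p.1 < q.1) := (List.pairwise_cons.mp hpw).2
    by_cases hc : p.2 ≥ v ∧ |p.2 - v| < |b - v|
    · have habs : |p.2 - v| = p.2 - v := abs_of_nonneg (by omega)
      have hcc : p.2 ≥ v ∧ p.2 - v < |b - v| := ⟨hc.1, by rw [← habs]; exact hc.2⟩
      -- LHS step
      have hL : (p :: t).foldl (pvStepHigh v) (b, i) = t.foldl (pvStepHigh v) (p.2, p.1) := by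
        simp only [List.foldl_cons, pvStepHigh, if_pos hc]
      -- candidates of the cons list
      have hF : (p :: t).filterMap (fun p => if p.2 ≥ v ∧ p.2 - v < |b - v| then some (p.2 - v, p.1) else none)
          = (p.2 - v, p.1) :: t.filterMap (fun p => if p.2 ≥ v ∧ p.2 - v < |b - v| then some (p.2 - v, p.1) else none) := by
        simp only [List.filterMap_cons, if_pos hcc]
      rw [hL, ih (p.2) (p.1) ht, hF]
      simp only [habs]
      -- now compare the two min-matches
      set C := t.filterMap (fun q => if q.2 ≥ v ∧ q.2 - v < |b - v| then some (q.2 - v, q.1) else none) with hCdef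
      set C' := t.filterMap (fun q => if q.2 ≥ v ∧ q.2 - v < p.2 - v then some (q.2 - v, q.1) else none) with hC'def
      by_cases hne : C' = []
      · -- no tail candidate beats p: head is least
        have hnone : ∀ q ∈ t, ¬ (q.2 ≥ v ∧ q.2 - v < p.2 - v) := by
          intro q hq hqc
          have : (q.2 - v, q.1) ∈ C' := (pvMemCandsHigh v (p.2 - v) t _).mpr ⟨q, hq, hqc, rfl⟩
          rw [hne] at this; cases this
        have hleast : ∀ x ∈ (p.2 - v, p.1) :: C, pvLexLe (p.2 - v, p.1) x := by
          intro x hx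
          rcases List.mem_cons.mp hx with rfl | hx
          · exact Or.inr ⟨rfl, le_refl _⟩
          · obtain ⟨q, hq, hqc, rfl⟩ := (pvMemCandsHigh v (|b - v|) t x).mp hx
            have hnlt : ¬ (q.2 - v < p.2 - v) := fun hlt => hnone q hq ⟨hqc.1, hlt⟩
            unfold pvLexLe
            simp only
            have := hpt q hq
            omega
        rw [hne, pvMin2Least _ _ List.mem_cons_self hleast]
        simp only [List.foldl_nil]
        exact Prod.ext (show p.2 = v + (p.2 - v) by omega) rfl
      · obtain ⟨m, hm, hmmem, hmle⟩ := pvMin2Spec C' hne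
        obtain ⟨q, hq, hqc, rfl⟩ := (pvMemCandsHigh v (p.2 - v) t m).mp hmmem
        have hmC : (q.2 - v, q.1) ∈ C :=
          (pvMemCandsHigh v (|b - v|) t _).mpr ⟨q, hq, ⟨hqc.1, by omega⟩, rfl⟩
        have hleast : ∀ x ∈ (p.2 - v, p.1) :: C, pvLexLe (q.2 - v, q.1) x := by
          intro x hx
          rcases List.mem_cons.mp hx with rfl | hx
          · exact Or.inl (show q.2 - v < p.2 - v by omega)
          · obtain ⟨q', hq', hq'c, rfl⟩ := (pvMemCandsHigh v (|b - v|) t x).mp hx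
            by_cases hlt : q'.2 - v < p.2 - v
            · exact hmle _ ((pvMemCandsHigh v (p.2 - v) t _).mpr ⟨q', hq', ⟨hq'c.1, hlt⟩, rfl⟩)
            · exact Or.inl (show q.2 - v < q'.2 - v by omega)
        rw [hm, pvMin2Least _ _ (List.mem_cons_of_mem _ hmC) hleast]
    · have hL : (p :: t).foldl (pvStepHigh v) (b, i) = t.foldl (pvStepHigh v) (b, i) := by
        simp only [List.foldl_cons, pvStepHigh, if_neg hc]
      have hnc : ¬ (p.2 ≥ v ∧ p.2 - v < |b - v|) := by
        intro hcc
        exact hc ⟨hcc.1, by rw [abs_of_nonneg (by omega : (0:Int) ≤ p.2 - v)]; exact hcc.2⟩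
      have hF : (p :: t).filterMap (fun p => if p.2 ≥ v ∧ p.2 - v < |b - v| then some (p.2 - v, p.1) else none)
          = t.filterMap (fun p => if p.2 ≥ v ∧ p.2 - v < |b - v| then some (p.2 - v, p.1) else none) := by
        simp only [List.filterMap_cons, if_neg hnc]
      rw [hL, hF, ih b i ht]

lemma pvMemCandsLow (v thr : Int) (t : List (Int × Int)) (x : Int × Int) :
    x ∈ t.filterMap (fun p => if p.2 ≤ v ∧ v - p.2 < thr then some (v - p.2, p.1) else none)
      ↔ ∃ q ∈ t, (q.2 ≤ v ∧ v - q.2 < thr) ∧ x = (v - q.2, q.1) := by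
  simp only [List.mem_filterMap]
  constructor
  · rintro ⟨q, hq, hfq⟩
    by_cases hc : q.2 ≤ v ∧ v - q.2 < thr
    · rw [if_pos hc] at hfq
      exact ⟨q, hq, hc, (Option.some_inj.mp hfq).symm⟩
    · rw [if_neg hc] at hfq; cases hfq
  · rintro ⟨q, hq, hc, rfl⟩
    exact ⟨q, hq, by rw [if_pos hc]⟩

lemma pvLowLoop (v : Int) (l : List (Int × Int)) : ∀ (b i : Int),
    l.Pairwise (fun p q => p.1 < q.1) →
    l.foldl (pvStepLow v) (b, i)
      = match (l.filterMap (fun p => if p.2 ≤ v ∧ v - p.2 < |b - v| then some (v - p.2, p.1) else none)).foldl pvM2Step none with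
        | some di => (v - di.1, di.2)
        | none => (b, i) := by
  induction l with
  | nil => intro b i _; rfl
  | cons p t ih =>
    intro b i hpw
    have hpt : ∀ q ∈ t, p.1 < q.1 := (List.pairwise_cons.mp hpw).1
    have ht : t.Pairwise (fun p q => p.1 < q.1) := (List.pairwise_cons.mp hpw).2
    by_cases hc : p.2 ≤ v ∧ |p.2 - v| < |b - v|
    · have habs : |p.2 - v| = v - p.2 := by rw [abs_of_nonpos (by omega : p.2 - v ≤ 0)]; ring
      have hcc : p.2 ≤ v ∧ v - p.2 < |b - v| := ⟨hc.1, by rw [← habs]; exact hc.2⟩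
      have hL : (p :: t).foldl (pvStepLow v) (b, i) = t.foldl (pvStepLow v) (p.2, p.1) := by
        simp only [List.foldl_cons, pvStepLow, if_pos hc]
      have hF : (p :: t).filterMap (fun p => if p.2 ≤ v ∧ v - p.2 < |b - v| then some (v - p.2, p.1) else none)
          = (v - p.2, p.1) :: t.filterMap (fun p => if p.2 ≤ v ∧ v - p.2 < |b - v| then some (v - p.2, p.1) else none) := by
        simp only [List.filterMap_cons, if_pos hcc]
      rw [hL, ih (p.2) (p.1) ht, hF]
      simp only [habs]
      set C := t.filterMap (fun q => if q.2 ≤ v ∧ v - q.2 < |b - v| then some (v - q.2, q.1) else none) with hCdef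
      set C' := t.filterMap (fun q => if q.2 ≤ v ∧ v - q.2 < v - p.2 then some (v - q.2, q.1) else none) with hC'def
      by_cases hne : C' = []
      · have hnone : ∀ q ∈ t, ¬ (q.2 ≤ v ∧ v - q.2 < v - p.2) := by
          intro q hq hqc
          have : (v - q.2, q.1) ∈ C' := (pvMemCandsLow v (v - p.2) t _).mpr ⟨q, hq, hqc, rfl⟩
          rw [hne] at this; cases this
        have hleast : ∀ x ∈ (v - p.2, p.1) :: C, pvLexLe (v - p.2, p.1) x := by
          intro x hx
          rcases List.mem_cons.mp hx with rfl | hx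
          · exact Or.inr ⟨rfl, le_refl _⟩
          · obtain ⟨q, hq, hqc, rfl⟩ := (pvMemCandsLow v (|b - v|) t x).mp hx
            have hnlt : ¬ (v - q.2 < v - p.2) := fun hlt => hnone q hq ⟨hqc.1, hlt⟩
            unfold pvLexLe
            simp only
            have := hpt q hq
            omega
        rw [hne, pvMin2Least _ _ List.mem_cons_self hleast]
        simp only [List.foldl_nil]
        exact Prod.ext (show p.2 = v - (v - p.2) by omega) rfl
      · obtain ⟨m, hm, hmmem, hmle⟩ := pvMin2Spec C' hne
        obtain ⟨q, hq, hqc, rfl⟩ := (pvMemCandsLow v (v - p.2) t m).mp hmmem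
        have hmC : (v - q.2, q.1) ∈ C :=
          (pvMemCandsLow v (|b - v|) t _).mpr ⟨q, hq, ⟨hqc.1, by omega⟩, rfl⟩
        have hleast : ∀ x ∈ (v - p.2, p.1) :: C, pvLexLe (v - q.2, q.1) x := by
          intro x hx
          rcases List.mem_cons.mp hx with rfl | hx
          · exact Or.inl (show v - q.2 < v - p.2 by omega)
          · obtain ⟨q', hq', hq'c, rfl⟩ := (pvMemCandsLow v (|b - v|) t x).mp hx
            by_cases hlt : v - q'.2 < v - p.2
            · exact hmle _ ((pvMemCandsLow v (v - p.2) t _).mpr ⟨q', hq', ⟨hq'c.1, hlt⟩, rfl⟩)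
            · exact Or.inl (show v - q.2 < v - q'.2 by omega)
        rw [hm, pvMin2Least _ _ (List.mem_cons_of_mem _ hmC) hleast]
    · have hL : (p :: t).foldl (pvStepLow v) (b, i) = t.foldl (pvStepLow v) (b, i) := by
        simp only [List.foldl_cons, pvStepLow, if_neg hc]
      have hnc : ¬ (p.2 ≤ v ∧ v - p.2 < |b - v|) := by
        intro hcc
        refine hc ⟨hcc.1, ?_⟩
        rw [abs_of_nonpos (by omega : p.2 - v ≤ 0)]
        omega
      have hF : (p :: t).filterMap (fun p => if p.2 ≤ v ∧ v - p.2 < |b - v| then some (v - p.2, p.1) else none)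
          = t.filterMap (fun p => if p.2 ≤ v ∧ v - p.2 < |b - v| then some (v - p.2, p.1) else none) := by
        simp only [List.filterMap_cons, if_neg hnc]
      rw [hL, hF, ih b i ht]

-- ===== VERDICT (by name: the statement is the Claim_ definition above) =====
theorem find_range_spec : Claim_equal_find_range := by
  intro divisors v _ _
  unfold Spec_find_range
  show find_range divisors v = find_range_alt divisors v
  simp only [find_range, find_range_alt]
  rw [PySem.List.foldl_prod_mk]
  rw [pvLowLoop v _ _ _ (PySem.List.pairwise_lt_enumerate divisors 0),
      pvHighLoop v _ _ _ (PySem.List.pairwise_lt_enumerate divisors 0)]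
  rw [pvMin2Eq, pvMin2Eq]
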